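-- pv_equiv track=rewrite | github.com/MaxGhenis/mystquarto | src/mystquarto/scanner.py | _strip_indent
-- ===== SOURCE A (Python) =====
-- def _strip_indent(line: str, indent: int) -> str:
--     """Remove up to `indent` spaces from the beginning of a line."""
--     if indent == 0:
--         return line
--     # Remove up to indent characters of whitespace
--     removed = 0
--     for ch in line:
--         if removed >= indent:
--             break
--         if ch == " ":
--             removed += 1
--         elif ch == "\t":
--             removed += 1  # treat tab as 1 for simplicity
--         else:
--             break
--     return line[removed:]
-- ===== SOURCE B (Python) =====
-- def _strip_indent(line: str, indent: int) -> str: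
--     """Remove up to `indent` spaces from the beginning of a line."""
--     if indent <= 0:
--         return line
--     lead = len(line) - len(line.lstrip(" \t"))
--     return line[min(lead, indent):]
-- ===== Notes on version B (the rewrite author's own statement) =====
-- stated objective: simpler
-- what changed: Replaces the explicit per-character counting loop with a measurement of the whole leading space/tab run via lstrip and a single min against indent, plus a widened indent<=0 guard.
import Mathlib
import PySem

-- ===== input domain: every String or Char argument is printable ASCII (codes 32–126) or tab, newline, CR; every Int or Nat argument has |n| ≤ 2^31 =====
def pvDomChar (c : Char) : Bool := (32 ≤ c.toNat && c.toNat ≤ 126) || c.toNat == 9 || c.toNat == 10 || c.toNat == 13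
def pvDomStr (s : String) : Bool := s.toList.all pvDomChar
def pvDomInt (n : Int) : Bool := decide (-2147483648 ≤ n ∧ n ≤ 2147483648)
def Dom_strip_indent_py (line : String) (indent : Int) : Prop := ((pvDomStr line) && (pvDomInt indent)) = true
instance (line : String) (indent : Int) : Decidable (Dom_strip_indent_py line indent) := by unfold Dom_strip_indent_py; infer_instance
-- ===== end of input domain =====

-- B replaces A's per-character counting loop with one measurement of the leading
-- space/tab run (via lstrip) and a single min against indent; objective: simpler.

-- ===== PORT A =====
-- the for-loop of A: walks the characters, counting removed until it reaches
-- indent or hits a non-space/tab character; returns the final 'removed'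
def stripIndentLoop (chars : List Char) (removed indent : Int) : Int :=
  match chars with
  | [] => removed
  | ch :: rest =>
    if removed ≥ indent then removed
    else if ch = ' ' then stripIndentLoop rest (removed + 1) indent
    else if ch = '\t' then stripIndentLoop rest (removed + 1) indent
    else removed

def strip_indent_py (line : String) (indent : Int) : String :=
  if indent = 0 then line
  else
    let removed := stripIndentLoop line.toList 0 indent
    PySem.Str.slice line (some removed) none

-- ===== PORT B =====
-- hand port of len(line) - len(line.lstrip(" \t")): the length of the leading
-- run of ' '/'\t' characters (exact: lstrip(" \t") drops exactly that run)
def leadWs (line : String) : Int :=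
  ((line.toList.takeWhile fun c => c = ' ' ∨ c = '\t').length : Int)

def strip_indent_py_alt (line : String) (indent : Int) : String :=
  if indent ≤ 0 then line
  else PySem.Str.slice line (some (min (leadWs line) indent)) none

-- ===== PRECONDITION & SPEC =====
def Spec_strip_indent_py (line : String) (indent : Int) (out : String) : Prop := out = strip_indent_py_alt line indent
instance (line : String) (indent : Int) (out : String) : Decidable (Spec_strip_indent_py line indent out) := by unfold Spec_strip_indent_py; infer_instance

-- ===== CLAIM (what is proved, stated in full; the proofs are below) =====
def Claim_equal_strip_indent_py : Prop := ∀ (line : String) (indent : Int), Dom_strip_indent_py line indent → Spec_strip_indent_py line indent (strip_indent_py line indent)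

-- ===== LEMMAS AND PROOFS =====

theorem stripIndentLoop_eq_min (cs : List Char) :
    ∀ removed indent : Int, removed ≤ indent →
      stripIndentLoop cs removed indent
        = min (removed + ((cs.takeWhile fun c => c = ' ' ∨ c = '\t').length : Int)) indent := by
  induction cs with
  | nil => intro r i h; simp [stripIndentLoop, h]
  | cons c rest ih =>
    intro r i h
    by_cases hge : r ≥ i
    · have hri : r = i := le_antisymm h hge
      subst hri
      simp only [stripIndentLoop, if_pos hge]
      have : (0:Int) ≤ (((c :: rest).takeWhile fun c => c = ' ' ∨ c = '\t').length : Int) := by positivity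
      omega
    · have hlt : r < i := lt_of_not_ge hge
      by_cases hsp : c = ' '
      · simp only [stripIndentLoop, if_neg hge, if_pos hsp, List.takeWhile]
        have hc : (decide (c = ' ' ∨ c = '\t')) = true := by simp [hsp]
        rw [ih (r + 1) i (by omega)]
        simp [hc]; omega
      · by_cases htb : c = '\t'
        · simp only [stripIndentLoop, if_neg hge, if_neg hsp, if_pos htb, List.takeWhile]
          have hc : (decide (c = ' ' ∨ c = '\t')) = true := by simp [htb]
          rw [ih (r + 1) i (by omega)]
          simp [hc]; omega
        · simp only [stripIndentLoop, if_neg hge, if_neg hsp, if_neg htb, List.takeWhile]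
          have hc : (decide (c = ' ' ∨ c = '\t')) = false := by simp [hsp, htb]
          simp [hc]; omega

theorem stripIndentLoop_nonpos (cs : List Char) (indent : Int) (h : indent ≤ 0) :
    stripIndentLoop cs 0 indent = 0 := by
  cases cs with
  | nil => rfl
  | cons c rest => simp [stripIndentLoop, h]

theorem slice_zero (line : String) : PySem.Str.slice line (some 0) none = line := by
  simp [PySem.Str.slice, PySem.Chars.slice_eq_listSlice]

-- ===== VERDICT (by name: the statement is the Claim_ definition above) =====
theorem strip_indent_py_spec : Claim_equal_strip_indent_py := by
  intro line indent _
  unfold Spec_strip_indent_py strip_indent_py strip_indent_py_alt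
  by_cases h0 : indent = 0
  · simp [h0]
  · by_cases hle : indent ≤ 0
    · simp only [if_neg h0, if_pos hle]
      rw [stripIndentLoop_nonpos _ _ hle, slice_zero]
    · simp only [if_neg h0, if_neg hle]
      rw [stripIndentLoop_eq_min _ 0 indent (by omega)]
      simp [leadWs]
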